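-- pv_equiv track=rewrite | github.com/janaraj/volnix | volnix/packs/runtime.py | _match_entity_type
-- ===== SOURCE A (Python) =====
-- def _match_entity_type(
--     results: list[dict],
--     entity_schemas: dict[str, dict],
-- ) -> str | None:
--     """Match result items to an entity type by field overlap with schemas.
--
--     Generic across all packs — no hardcoded mappings.
--     """
--     if not results:
--         return max(
--             entity_schemas,
--             key=lambda t: len(entity_schemas[t].get("properties", {})),
--             default=None,
--         )
--
--     result_fields: set[str] = set()
--     for r in results[:3]:
--         result_fields.update(r.keys())
--
--     best_type = None
--     best_overlap = 0
--     for etype, schema in entity_schemas.items():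
--         schema_fields = set(schema.get("properties", {}).keys())
--         overlap = len(result_fields & schema_fields)
--         if overlap > best_overlap:
--             best_overlap = overlap
--             best_type = etype
--     return best_type
-- ===== SOURCE B (Python) =====
-- def _match_entity_type(
--     results: list[dict],
--     entity_schemas: dict[str, dict],
-- ) -> str | None:
--     """Match result items to an entity type via an inverted property->types index."""
--     if not results:
--         return max(
--             entity_schemas,
--             key=lambda t: len(entity_schemas[t].get("properties", {})),
--             default=None,
--         )
--
--     result_fields: set[str] = set()
--     for r in results[:3]:
--         result_fields.update(r.keys())
--
--     # one pass over all schemas: flatten to (property, entity type) pairs,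
--     # then invert into property -> [entity types declaring it]
--     prop_type_pairs = [
--         (prop, etype)
--         for etype, schema in entity_schemas.items()
--         for prop in schema.get("properties", {})
--     ]
--     index: dict[str, list[str]] = {}
--     for prop, etype in prop_type_pairs:
--         index.setdefault(prop, []).append(etype)
--
--     # per-type overlap counts driven by the result fields through the index
--     counts: dict[str, int] = {}
--     for field in result_fields:
--         for etype in index.get(field, ()):
--             counts[etype] = counts.get(etype, 0) + 1
--
--     best_type, best_overlap = None, 0
--     for etype in entity_schemas:
--         c = counts.get(etype, 0)
--         if c > best_overlap:
--             best_type, best_overlap = etype, c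
--     return best_type
-- ===== Notes on version B (the rewrite author's own statement) =====
-- stated objective: alternative
-- what changed: B keeps the empty-results branch and result_fields construction, but replaces A's per-type set-intersection scan by an inverted property-to-types index built in one pass, per-type counts incremented per result field through that index, and a final first-wins strict-max scan over entity_schemas.
import Mathlib
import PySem

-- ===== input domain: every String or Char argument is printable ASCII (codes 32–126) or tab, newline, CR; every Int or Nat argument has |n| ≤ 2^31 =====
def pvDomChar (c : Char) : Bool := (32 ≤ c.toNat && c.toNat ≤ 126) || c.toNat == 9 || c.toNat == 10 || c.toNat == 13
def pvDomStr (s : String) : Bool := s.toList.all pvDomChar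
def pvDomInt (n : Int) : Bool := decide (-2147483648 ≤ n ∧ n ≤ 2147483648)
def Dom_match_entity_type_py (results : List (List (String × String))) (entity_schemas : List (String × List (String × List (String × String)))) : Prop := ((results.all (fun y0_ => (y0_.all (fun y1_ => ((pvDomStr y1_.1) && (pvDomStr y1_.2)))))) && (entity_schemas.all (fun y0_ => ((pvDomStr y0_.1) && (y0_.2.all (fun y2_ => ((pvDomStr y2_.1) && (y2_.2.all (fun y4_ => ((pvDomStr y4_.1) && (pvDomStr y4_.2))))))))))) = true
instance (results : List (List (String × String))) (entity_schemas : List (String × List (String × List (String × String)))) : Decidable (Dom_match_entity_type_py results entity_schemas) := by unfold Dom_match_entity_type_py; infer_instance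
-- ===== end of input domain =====

-- B replaces A's per-type set-intersection scan by an inverted property→types index and a
-- per-type count dict driven by the result fields (objective: alternative decomposition).

-- ===== PORT A =====
-- schema.get("properties", {})   (dict lookup with default; used verbatim by both ports)
def pvProperties (schema : List (String × List (String × String))) : List (String × String) :=
  (PySem.Dict.mk schema).getD "properties" []

-- result_fields: set(); for r in results[:3]: result_fields.update(r.keys())   (identical in A and B)
def pvResultFields (results : List (List (String × String))) : PySem.Set String :=
  (results.take 3).foldl (fun s r => PySem.Set.update s (r.map Prod.fst)) PySem.Set.empty

def match_entity_type_py (results : List (List (String × String))) (entity_schemas : List (String × List (String × List (String × String)))) : Option String :=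
  if results = [] then
    -- max(entity_schemas, key=lambda t: len(entity_schemas[t].get("properties", {})), default=None)
    PySem.List.max? (entity_schemas.map Prod.fst)
      (fun t => ((pvProperties ((PySem.Dict.mk entity_schemas).getD t [])).length : Int))
  else
    let resultFields := pvResultFields results
    -- for etype, schema in entity_schemas.items(): set intersection per type, running strict max
    let best := entity_schemas.foldl
      (fun (st : Option String × Int) p =>
        let schemaFields := PySem.Set.ofList ((pvProperties p.2).map Prod.fst)
        let overlap := PySem.Set.len (PySem.Set.inter resultFields schemaFields)
        if st.2 < overlap then (some p.1, overlap) else st)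
      (none, 0)
    best.1

-- ===== PORT B =====
def match_entity_type_py_alt (results : List (List (String × String))) (entity_schemas : List (String × List (String × List (String × String)))) : Option String :=
  if results = [] then
    PySem.List.max? (entity_schemas.map Prod.fst)
      (fun t => ((pvProperties ((PySem.Dict.mk entity_schemas).getD t [])).length : Int))
  else
    let resultFields := pvResultFields results
    -- prop_type_pairs = [(prop, etype) for etype, schema in … for prop in schema.get("properties", {})]
    let propTypePairs : List (String × String) :=
      entity_schemas.flatMap (fun p => ((pvProperties p.2).map Prod.fst).map (fun prop => (prop, p.1)))
    -- index: dict prop -> list of entity types declaring it (setdefault/append loop)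
    let index : PySem.Dict String (List String) :=
      propTypePairs.foldl (fun d q => d.modify q.1 [] (fun l => l ++ [q.2])) PySem.Dict.empty
    -- counts: for field in result_fields: for etype in index.get(field, ()): counts[etype] += 1
    let counts : PySem.Dict String Int :=
      resultFields.foldl
        (fun d f => (index.getD f []).foldl (fun d e => d.modify e 0 (fun c => c + 1)) d)
        PySem.Dict.empty
    -- final strict-max scan over entity_schemas in order
    let best := (entity_schemas.map Prod.fst).foldl
      (fun (st : Option String × Int) t =>
        let c := counts.getD t 0
        if st.2 < c then (some t, c) else st)
      (none, 0)
    best.1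

-- ===== PRECONDITION & SPEC =====
-- Pre_ only requires the association lists standing for Python dicts to have distinct keys
-- (entity_schemas itself and each schema's "properties" dict): every input obtained from real
-- Python dicts satisfies this, so no input the Python A returns on is excluded.
def Pre_match_entity_type_py (results : List (List (String × String))) (entity_schemas : List (String × List (String × List (String × String)))) : Prop :=
  (entity_schemas.map Prod.fst).Nodup ∧
  ∀ p ∈ entity_schemas, ((pvProperties p.2).map Prod.fst).Nodup
instance (results : List (List (String × String))) (entity_schemas : List (String × List (String × List (String × String)))) : Decidable (Pre_match_entity_type_py results entity_schemas) := by unfold Pre_match_entity_type_py; infer_instance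

def pvWitness_match_entity_type_py : (List (List (String × String))) × (List (String × List (String × List (String × String)))) :=
  ([[("a", "1"), ("b", "2")]], [("T1", [("properties", [("a", "s"), ("c", "s")])]), ("T2", [])])

def Spec_match_entity_type_py (results : List (List (String × String))) (entity_schemas : List (String × List (String × List (String × String)))) (out : Option String) : Prop := out = match_entity_type_py_alt results entity_schemas
instance (results : List (List (String × String))) (entity_schemas : List (String × List (String × List (String × String)))) (out : Option String) : Decidable (Spec_match_entity_type_py results entity_schemas out) := by unfold Spec_match_entity_type_py; infer_instance

-- ===== CLAIM (what is proved, stated in full; the proofs are below) =====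
def Claim_equal_match_entity_type_py : Prop := ∀ (results : List (List (String × String))) (entity_schemas : List (String × List (String × List (String × String)))), Dom_match_entity_type_py results entity_schemas → Pre_match_entity_type_py results entity_schemas → Spec_match_entity_type_py results entity_schemas (match_entity_type_py results entity_schemas)

-- ===== LEMMAS AND PROOFS =====

-- one schema's contribution to the flattened (prop, type) pairs, counted at key p.1 / field f
theorem pv_entry_count (p' p : String × List (String × List (String × String))) (f : String)
    (hnd : ((pvProperties p'.2).map Prod.fst).Nodup) :
    (List.countP (fun q => ((fun x => x == p.1) ∘ Prod.snd) q && q.1 == f) ∘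
        (fun p' => ((pvProperties p'.2).map Prod.fst).map (fun prop => (prop, p'.1)))) p'
      = if p'.1 = p.1 then (if f ∈ (pvProperties p'.2).map Prod.fst then 1 else 0) else 0 := by
  simp only [Function.comp_apply, Function.comp_def, List.countP_map]
  by_cases h : p'.1 = p.1
  · have hb : (p'.1 == p.1) = true := by simpa using h
    simp only [hb, Bool.true_and, if_pos h]
    have hcp : List.countP (fun x : String × String => x.1 == f) (pvProperties p'.2)
        = List.count f ((pvProperties p'.2).map Prod.fst) := by
      rw [List.count_eq_countP, List.countP_map]; rfl
    by_cases hf : f ∈ (pvProperties p'.2).map Prod.fst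
    · rw [if_pos hf, hcp]
      exact List.count_eq_one_of_mem hnd hf
    · rw [if_neg hf, hcp]
      exact List.count_eq_zero_of_not_mem hf
  · have hb : (p'.1 == p.1) = false := by simpa using h
    simp [hb, h]

-- summing over an assoc list with unique keys a function that vanishes off key k
theorem pv_sum_key {β : Type} (es : List (String × β)) (k : String) (F : String × β → Nat)
    (hk : (es.map Prod.fst).Nodup) (p : String × β) (hpmem : p ∈ es) (hpk : p.1 = k) :
    (es.map (fun p' => if p'.1 = k then F p' else 0)).sum = F p := by
  induction es with
  | nil => cases hpmem
  | cons q t ih =>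
      simp only [List.map_cons, List.nodup_cons] at hk
      rcases List.mem_cons.mp hpmem with h | h
      · subst h
        have hz : ∀ x ∈ t.map (fun p' => if p'.1 = k then F p' else 0), x = 0 := by
          intro x hx
          rcases List.mem_map.mp hx with ⟨p', hp', rfl⟩
          have : p'.1 ≠ k := by
            intro hc
            exact hk.1 (hpk ▸ hc ▸ List.mem_map_of_mem hp')
          simp [this]
        simp [List.sum_eq_zero hz, hpk]
      · have hqk : q.1 ≠ k := by
          intro hc
          have hm : p.1 ∈ t.map Prod.fst := List.mem_map_of_mem h
          exact hk.1 (by rw [hc, ← hpk]; exact hm)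
        simp only [List.map_cons, List.sum_cons, if_neg hqk, Nat.zero_add]
        exact ih hk.2 h

-- the inverted-index row for field f holds entity type p.1 exactly once iff f is one of p's properties
theorem pv_row_count (es : List (String × List (String × List (String × String))))
    (hk : (es.map Prod.fst).Nodup)
    (hp : ∀ p ∈ es, ((pvProperties p.2).map Prod.fst).Nodup)
    (p : String × List (String × List (String × String))) (hpmem : p ∈ es) (f : String) :
    (((es.flatMap (fun p => ((pvProperties p.2).map Prod.fst).map (fun prop => (prop, p.1)))).foldl
        (fun d q => d.modify q.1 [] (fun l => l ++ [q.2])) PySem.Dict.empty).getD f []).count p.1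
      = (if f ∈ (pvProperties p.2).map Prod.fst then (1 : Nat) else 0) := by
  rw [PySem.Dict.getD_foldl_modify_append, PySem.Dict.getD_empty, List.nil_append]
  rw [List.count_eq_countP, List.countP_map, List.countP_filter, List.countP_flatMap]
  rw [List.map_congr_left (fun p' h' => pv_entry_count p' p f (hp p' h'))]
  exact pv_sum_key es p.1 (fun p' => if f ∈ (pvProperties p'.2).map Prod.fst then 1 else 0)
    hk p hpmem rfl

-- unrolling the nested counting fold: final count of e = initial count + Σ_f count of e in row f
theorem pv_counts_fold (g : String → List String) (l : List String)
    (d : PySem.Dict String Int) (e : String) :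
    (l.foldl (fun d f => (g f).foldl (fun d e => d.modify e 0 (fun c => c + 1)) d) d).getD e 0
      = d.getD e 0 + (l.map (fun f => ((g f).count e : Int))).sum := by
  induction l generalizing d with
  | nil => simp
  | cons f t ih =>
      simp only [List.foldl_cons, List.map_cons, List.sum_cons]
      rw [ih, PySem.Dict.getD_foldl_modify_add_one]
      ring

theorem pv_contains_ofList (P : List String) (f : String) :
    (PySem.Set.ofList P).contains f = decide (f ∈ P) := by
  by_cases h : f ∈ P
  · simp [PySem.Set.contains, (PySem.Set.mem_ofList P f).mpr h, h]
  · simp [PySem.Set.contains, h]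

-- B's count for entity type p.1 equals A's set-intersection overlap for p
theorem pv_overlap (results : List (List (String × String)))
    (es : List (String × List (String × List (String × String))))
    (hk : (es.map Prod.fst).Nodup)
    (hp : ∀ p ∈ es, ((pvProperties p.2).map Prod.fst).Nodup)
    (p : String × List (String × List (String × String))) (hpmem : p ∈ es) :
    ((pvResultFields results).foldl
        (fun d f => ((((es.flatMap (fun p => ((pvProperties p.2).map Prod.fst).map (fun prop => (prop, p.1)))).foldl
            (fun d q => d.modify q.1 [] (fun l => l ++ [q.2])) PySem.Dict.empty)).getD f []).foldl
            (fun d e => d.modify e 0 (fun c => c + 1)) d)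
        PySem.Dict.empty).getD p.1 0
      = PySem.Set.len (PySem.Set.inter (pvResultFields results)
          (PySem.Set.ofList ((pvProperties p.2).map Prod.fst))) := by
  rw [pv_counts_fold, PySem.Dict.getD_empty, zero_add]
  have hrow : ∀ f ∈ pvResultFields results,
      ((((es.flatMap (fun p => ((pvProperties p.2).map Prod.fst).map (fun prop => (prop, p.1)))).foldl
          (fun d q => d.modify q.1 [] (fun l => l ++ [q.2])) PySem.Dict.empty)).getD f []).count p.1
        = (if f ∈ (pvProperties p.2).map Prod.fst then (1 : Nat) else 0) := by
    intro f _
    exact pv_row_count es hk hp p hpmem f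
  calc ((pvResultFields results).map
          (fun f => ((((es.flatMap (fun p => ((pvProperties p.2).map Prod.fst).map (fun prop => (prop, p.1)))).foldl
            (fun d q => d.modify q.1 [] (fun l => l ++ [q.2])) PySem.Dict.empty)).getD f []).count p.1 : String → Int)).sum
      = ((pvResultFields results).map
          (fun f => if (decide (f ∈ (pvProperties p.2).map Prod.fst)) = true then (1 : Int) else 0)).sum := by
        refine congrArg List.sum (List.map_congr_left ?_)
        intro f hf
        rw [hrow f hf]
        by_cases h : f ∈ (pvProperties p.2).map Prod.fst <;> simp [h]
    _ = (List.countP (fun f => decide (f ∈ (pvProperties p.2).map Prod.fst)) (pvResultFields results) : Int) := by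
        exact PySem.List.sum_map_ite_one_zero _ _
    _ = PySem.Set.len (PySem.Set.inter (pvResultFields results)
          (PySem.Set.ofList ((pvProperties p.2).map Prod.fst))) := by
        simp only [PySem.Set.len, PySem.Set.inter, ← List.countP_eq_length_filter]
        congr 1
        refine List.countP_congr ?_
        intro f _
        rw [pv_contains_ofList]

-- ===== VERDICT (by name: the statement is the Claim_ definition above) =====
theorem match_entity_type_py_spec : Claim_equal_match_entity_type_py := by
  intro results es _hdom hpre
  obtain ⟨hk, hp⟩ := hpre
  unfold Spec_match_entity_type_py match_entity_type_py match_entity_type_py_alt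
  by_cases hres : results = []
  · simp [hres]
  · simp only [if_neg hres]
    show (es.foldl
        (fun (st : Option String × Int) p =>
          if st.2 < PySem.Set.len (PySem.Set.inter (pvResultFields results)
              (PySem.Set.ofList ((pvProperties p.2).map Prod.fst)))
          then (some p.1, PySem.Set.len (PySem.Set.inter (pvResultFields results)
              (PySem.Set.ofList ((pvProperties p.2).map Prod.fst))))
          else st)
        (none, 0)).1 = _
    rw [List.foldl_map]
    have hcong := PySem.List.foldl_congr_mem es
      (fun (st : Option String × Int) p =>
        if st.2 < PySem.Set.len (PySem.Set.inter (pvResultFields results)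
            (PySem.Set.ofList ((pvProperties p.2).map Prod.fst)))
        then (some p.1, PySem.Set.len (PySem.Set.inter (pvResultFields results)
            (PySem.Set.ofList ((pvProperties p.2).map Prod.fst))))
        else st)
      (fun (st : Option String × Int) p =>
        if st.2 < ((pvResultFields results).foldl
            (fun d f => ((((es.flatMap (fun p => ((pvProperties p.2).map Prod.fst).map (fun prop => (prop, p.1)))).foldl
                (fun d q => d.modify q.1 [] (fun l => l ++ [q.2])) PySem.Dict.empty)).getD f []).foldl
                (fun d e => d.modify e 0 (fun c => c + 1)) d)
            PySem.Dict.empty).getD p.1 0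
        then (some p.1, ((pvResultFields results).foldl
            (fun d f => ((((es.flatMap (fun p => ((pvProperties p.2).map Prod.fst).map (fun prop => (prop, p.1)))).foldl
                (fun d q => d.modify q.1 [] (fun l => l ++ [q.2])) PySem.Dict.empty)).getD f []).foldl
                (fun d e => d.modify e 0 (fun c => c + 1)) d)
            PySem.Dict.empty).getD p.1 0)
        else st)
      (none, 0)
      (fun acc p hpm => by simp only []; rw [pv_overlap results es hk hp p hpm])
    rw [hcong]
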